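-- pv_equiv track=rewrite | github.com/zhouyuliufang/docker-manager | backend.py | _extract_error_summary
-- ===== SOURCE A (Python) =====
-- def _extract_error_summary(lines: list[str]) -> list[str]:
--     keywords = ["error", "failed", "denied", "permission", "not found",
--                 "port is already", "no space", "timeout", "unable to"]
--     errors = []
--     for ln in reversed(lines):
--         low = ln.lower()
--         if any(k in low for k in keywords):
--             errors.append(ln.strip())
--         if len(errors) >= 5:
--             break
--     return list(reversed(errors))
-- ===== SOURCE B (Python) =====
-- def _extract_error_summary(lines: list[str]) -> list[str]:
--     keywords = ["error", "failed", "denied", "permission", "not found",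
--                 "port is already", "no space", "timeout", "unable to"]
--     matches = [ln.strip() for ln in lines
--                if any(k in ln.lower() for k in keywords)]
--     return matches[-5:]
-- ===== Notes on version B (the rewrite author's own statement) =====
-- stated objective: simpler
-- what changed: Replaces the reverse-traversal with a bounded accumulator, early break and a final re-reverse by a single forward comprehension collecting all matches followed by a tail slice matches[-5:].
import Mathlib
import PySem

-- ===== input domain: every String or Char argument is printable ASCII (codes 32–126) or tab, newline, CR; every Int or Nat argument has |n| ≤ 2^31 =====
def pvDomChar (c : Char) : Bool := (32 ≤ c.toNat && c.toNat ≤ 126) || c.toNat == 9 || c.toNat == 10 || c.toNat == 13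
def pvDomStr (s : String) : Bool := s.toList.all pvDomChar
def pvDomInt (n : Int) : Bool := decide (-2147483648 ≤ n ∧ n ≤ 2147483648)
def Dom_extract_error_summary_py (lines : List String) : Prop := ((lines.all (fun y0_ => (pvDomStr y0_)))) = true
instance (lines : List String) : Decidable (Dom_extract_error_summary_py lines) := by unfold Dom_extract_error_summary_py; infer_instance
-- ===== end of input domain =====

-- B replaces A's reverse traversal with bounded buffer, early break and re-reverse by one
-- forward comprehension plus a tail slice matches[-5:] (objective: simpler).

-- the shared keyword list
def pvKeywords : List String :=
  ["error", "failed", "denied", "permission", "not found",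
   "port is already", "no space", "timeout", "unable to"]

-- ===== PORT A =====
-- A's loop over reversed(lines): append matching stripped lines, break at 5
def pvLoopA : List String → List String → List String
  | [], errors => errors
  | ln :: rest, errors =>
    let low := PySem.Str.lower ln
    let errors :=
      if pvKeywords.any (fun k => PySem.Str.isIn k low) then
        errors ++ [PySem.Str.strip ln]
      else errors
    if 5 ≤ errors.length then errors else pvLoopA rest errors

def extract_error_summary_py (lines : List String) : List String :=
  (pvLoopA lines.reverse []).reverse

-- ===== PORT B =====
def extract_error_summary_py_alt (lines : List String) : List String :=
  let ms :=
    (lines.filter (fun ln =>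
        pvKeywords.any (fun k => PySem.Str.isIn k (PySem.Str.lower ln)))).map
      PySem.Str.strip
  PySem.List.slice ms (some (-5)) none

-- ===== PRECONDITION & SPEC =====
def Spec_extract_error_summary_py (lines : List String) (out : List String) : Prop := out = extract_error_summary_py_alt lines
instance (lines : List String) (out : List String) : Decidable (Spec_extract_error_summary_py lines out) := by unfold Spec_extract_error_summary_py; infer_instance

-- ===== CLAIM (what is proved, stated in full; the proofs are below) =====
def Claim_equal_extract_error_summary_py : Prop := ∀ (lines : List String), Dom_extract_error_summary_py lines → Spec_extract_error_summary_py lines (extract_error_summary_py lines)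

-- ===== LEMMAS AND PROOFS =====

-- the match predicate shared by both ports
def pvMatch (ln : String) : Bool :=
  pvKeywords.any (fun k => PySem.Str.isIn k (PySem.Str.lower ln))

-- invariant of A's loop: with fewer than 5 errors collected so far, the loop
-- appends the first (5 - errors.length) stripped matches of the remaining lines
lemma pvLoopA_eq (rem : List String) : ∀ (errors : List String), errors.length < 5 →
    pvLoopA rem errors =
      errors ++ (((rem.filter pvMatch).map PySem.Str.strip).take (5 - errors.length)) := by
  induction rem with
  | nil => intro errors _; simp [pvLoopA]
  | cons ln rest ih =>
    intro errors h
    by_cases hm : pvMatch ln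
    · simp [pvMatch] at hm
      by_cases h5 : 5 ≤ errors.length + 1
      · have hlen : errors.length = 4 := by omega
        simp [pvLoopA, pvMatch, hm, hlen]
      · have h54 : 5 - errors.length = (5 - (errors.length + 1)) + 1 := by omega
        simp [pvLoopA, pvMatch, hm, h5, ih (errors ++ [PySem.Str.strip ln]) (by simp; omega), h54]
    · simp [pvMatch] at hm
      have hm2 : ¬ ∃ x ∈ pvKeywords, PySem.Chars.isIn x.toList (PySem.Chars.lower ln.toList) = true := by
        simpa using hm
      have h5 : ¬ 5 ≤ errors.length := by omega
      simp [pvLoopA, pvMatch, hm2, h5, ih errors h]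

-- ===== VERDICT (by name: the statement is the Claim_ definition above) =====
theorem extract_error_summary_py_spec : Claim_equal_extract_error_summary_py := by
  intro lines _
  unfold Spec_extract_error_summary_py extract_error_summary_py extract_error_summary_py_alt
  rw [pvLoopA_eq lines.reverse [] (by simp)]
  rw [PySem.List.slice_from_neg_ofNat _ 5 (by omega)]
  simp only [List.nil_append, List.filter_reverse, List.map_reverse, List.take_reverse,
    List.reverse_reverse, List.length_map]
  rfl
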